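-- pv_equiv track=rewrite | github.com/Novartis/ChemicalSeriesReconstruction | AutomatedSeriesClassification/cluster_utils.py | calc_node_assignments
-- ===== SOURCE A (Python) =====
-- def calc_node_assignments(children, Ndata, filtered_compounds):
--
--     # Assigns molecules to the clusters of the UPGMA tree
--     NumMolList=[];
--     MolDict={};
--
--     for i in range(len(children)):
--         N=0;
--         mols_assigned=[];
--         for j in range(len(children[i])):
--             if children[i][j] < Ndata:
--                 N += 1;
--                 mols_assigned.append(filtered_compounds[children[i][j]]);
--             else:
--                 N += NumMolList[children[i][j]-Ndata];
--                 mols_assigned += MolDict[children[i][j]];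
--
--         NumMolList.append(N);
--         MolDict[i+Ndata] = mols_assigned;
--
--     return NumMolList, MolDict
-- ===== SOURCE B (Python) =====
-- def calc_node_assignments(children, Ndata, filtered_compounds):
--     # Assigns molecules to the clusters of the UPGMA tree,
--     # by recursive memoized traversal of the tree instead of a flat bottom-up loop.
--     MolDict = {}
--
--     def members(idx):
--         if idx in MolDict:
--             return MolDict[idx]
--         if idx < Ndata:
--             return [filtered_compounds[idx]]
--         out = []
--         for c in children[idx - Ndata]:
--             out.extend(members(c))
--         return out
--
--     for i in range(len(children)):
--         MolDict[i + Ndata] = members(i + Ndata)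
--
--     NumMolList = [len(MolDict[i + Ndata]) for i in range(len(children))]
--     return NumMolList, MolDict
-- ===== Notes on version B (the rewrite author's own statement) =====
-- stated objective: alternative
-- what changed: Replaces the flat bottom-up loop that threads a parallel count list (NumMolList) through every iteration by a recursive memoized tree traversal members(idx) that builds only the member lists, with the counts derived at the end as their lengths.
import Mathlib
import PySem

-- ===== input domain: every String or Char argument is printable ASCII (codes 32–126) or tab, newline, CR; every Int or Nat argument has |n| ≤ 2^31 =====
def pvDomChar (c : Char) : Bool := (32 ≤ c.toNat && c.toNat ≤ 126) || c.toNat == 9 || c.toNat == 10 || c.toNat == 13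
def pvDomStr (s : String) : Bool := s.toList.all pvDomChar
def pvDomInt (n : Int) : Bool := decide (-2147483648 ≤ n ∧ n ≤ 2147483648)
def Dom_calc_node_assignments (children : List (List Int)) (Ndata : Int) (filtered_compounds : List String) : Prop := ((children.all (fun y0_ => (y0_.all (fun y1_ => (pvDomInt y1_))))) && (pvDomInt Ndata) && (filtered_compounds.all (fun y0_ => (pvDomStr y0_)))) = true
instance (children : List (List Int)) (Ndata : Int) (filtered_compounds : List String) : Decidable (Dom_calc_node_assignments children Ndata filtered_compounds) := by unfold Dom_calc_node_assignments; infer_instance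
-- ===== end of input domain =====

-- B replaces A's flat bottom-up loop (which threads a parallel count list) by a recursive
-- memoized tree traversal building only the member lists; counts are derived as lengths.


-- ===== PORT A =====
-- inner loop: for j in range(len(children[i])): …  (N, mols_assigned accumulator)
def pvAInner (Ndata : Int) (fc : List String) (nl : List Int) (d : PySem.Dict Int (List String)) (row : List Int) : Int × List String :=
  row.foldl (fun acc c =>
    if c < Ndata then (acc.1 + 1, acc.2 ++ [PySem.List.pyGetD fc c ""])
    else (acc.1 + PySem.List.pyGetD nl (c - Ndata) 0, acc.2 ++ d.getD c []))
    (0, [])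

-- outer loop: for i in range(len(children)): … building (NumMolList, MolDict)
def pvALoop (Ndata : Int) (fc : List String) : List (List Int) → Nat → List Int × PySem.Dict Int (List String) → List Int × PySem.Dict Int (List String)
  | [], _, st => st
  | row :: rest, i, st =>
    let inner := pvAInner Ndata fc st.1 st.2 row
    pvALoop Ndata fc rest (i + 1) (st.1 ++ [inner.1], st.2.insert ((i : Int) + Ndata) inner.2)

def calc_node_assignments (children : List (List Int)) (Ndata : Int) (filtered_compounds : List String) : List Int × (List (Int × List String)) :=
  let st := pvALoop Ndata filtered_compounds children 0 ([], PySem.Dict.empty)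
  (st.1, st.2.items)

-- ===== PORT B =====
-- members(idx): memo hit, a leaf, or the concatenation of the children's members
-- (fuel makes the recursion total; it is never exhausted on inputs where the Python returns)
def pvMembers (children : List (List Int)) (Ndata : Int) (fc : List String) (memo : PySem.Dict Int (List String)) : Nat → Int → List String
  | 0, _ => []
  | fuel + 1, idx =>
    match memo.get? idx with
    | some v => v
    | none =>
      if idx < Ndata then [PySem.List.pyGetD fc idx ""]
      else (PySem.List.pyGetD children (idx - Ndata) []).foldl
             (fun out c => out ++ pvMembers children Ndata fc memo fuel c) []

-- for i in range(len(children)): MolDict[i + Ndata] = members(i + Ndata)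
def pvBLoop (children : List (List Int)) (Ndata : Int) (fc : List String) : List (List Int) → Nat → PySem.Dict Int (List String) → PySem.Dict Int (List String)
  | [], _, m => m
  | _ :: rest, i, m =>
    pvBLoop children Ndata fc rest (i + 1)
      (m.insert ((i : Int) + Ndata) (pvMembers children Ndata fc m (children.length + 1) ((i : Int) + Ndata)))

def calc_node_assignments_alt (children : List (List Int)) (Ndata : Int) (filtered_compounds : List String) : List Int × (List (Int × List String)) :=
  let m := pvBLoop children Ndata filtered_compounds children 0 PySem.Dict.empty
  ((List.range children.length).map (fun (i : Nat) => (((m.getD ((i : Int) + Ndata) []).length : Int))), m.items)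

-- ===== PRECONDITION & SPEC =====
-- Pre_ holds exactly when every A lookup succeeds: each child entry is either a valid
-- (possibly negative, Python-style) index into filtered_compounds, or an internal node
-- Ndata ≤ c < Ndata + i built strictly earlier; otherwise A raises IndexError/KeyError.
def pvRowOK (Ndata fcLen : Int) (i : Int) (row : List Int) : Bool :=
  row.all (fun c => (decide (c < Ndata) && decide (-fcLen ≤ c) && decide (c < fcLen))
                 || (decide (Ndata ≤ c) && decide (c < Ndata + i)))

def pvPreFrom (Ndata fcLen : Int) : Nat → List (List Int) → Bool
  | _, [] => true
  | i, row :: rest => pvRowOK Ndata fcLen (i : Int) row && pvPreFrom Ndata fcLen (i + 1) rest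

def Pre_calc_node_assignments (children : List (List Int)) (Ndata : Int) (filtered_compounds : List String) : Prop :=
  pvPreFrom Ndata (filtered_compounds.length : Int) 0 children = true

instance (children : List (List Int)) (Ndata : Int) (filtered_compounds : List String) : Decidable (Pre_calc_node_assignments children Ndata filtered_compounds) := by unfold Pre_calc_node_assignments; infer_instance

def pvWitness_calc_node_assignments : List (List Int) × Int × List String := ([[0, 1], [2, 0]], 2, ["a", "b"])

def Spec_calc_node_assignments (children : List (List Int)) (Ndata : Int) (filtered_compounds : List String) (out : List Int × (List (Int × List String))) : Prop := out = calc_node_assignments_alt children Ndata filtered_compounds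
instance (children : List (List Int)) (Ndata : Int) (filtered_compounds : List String) (out : List Int × (List (Int × List String))) : Decidable (Spec_calc_node_assignments children Ndata filtered_compounds out) := by unfold Spec_calc_node_assignments; infer_instance

-- ===== CLAIM (what is proved, stated in full; the proofs are below) =====
def Claim_equal_calc_node_assignments : Prop := ∀ (children : List (List Int)) (Ndata : Int) (filtered_compounds : List String), Dom_calc_node_assignments children Ndata filtered_compounds → Pre_calc_node_assignments children Ndata filtered_compounds → Spec_calc_node_assignments children Ndata filtered_compounds (calc_node_assignments children Ndata filtered_compounds)

-- ===== LEMMAS AND PROOFS =====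

-- the common value both programs assign to a node whose children list is `row`,
-- given the member lists `d` of the earlier nodes
def pvFlat (Ndata : Int) (fc : List String) (d : PySem.Dict Int (List String)) (row : List Int) : List String :=
  row.flatMap (fun c => if c < Ndata then [PySem.List.pyGetD fc c ""] else d.getD c [])

lemma pvAInner_eq (Ndata : Int) (fc : List String) (nl : List Int) (d : PySem.Dict Int (List String)) (row : List Int)
    (hlen : ∀ c : Int, Ndata ≤ c → c < Ndata + (nl.length : Int) →
      PySem.List.pyGetD nl (c - Ndata) 0 = ((d.getD c []).length : Int))
    (hrow : ∀ c ∈ row, c < Ndata ∨ (Ndata ≤ c ∧ c < Ndata + (nl.length : Int))) :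
    pvAInner Ndata fc nl d row = (((pvFlat Ndata fc d row).length : Int), pvFlat Ndata fc d row) := by
  have key : ∀ (r : List Int) (acc : Int × List String),
      (∀ c ∈ r, c < Ndata ∨ (Ndata ≤ c ∧ c < Ndata + (nl.length : Int))) →
      r.foldl (fun acc c =>
        if c < Ndata then (acc.1 + 1, acc.2 ++ [PySem.List.pyGetD fc c ""])
        else (acc.1 + PySem.List.pyGetD nl (c - Ndata) 0, acc.2 ++ d.getD c [])) acc
      = (acc.1 + ((pvFlat Ndata fc d r).length : Int), acc.2 ++ pvFlat Ndata fc d r) := by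
    intro r
    induction r with
    | nil => intro acc _; simp [pvFlat]
    | cons c cs ih =>
      intro acc hr
      simp only [List.foldl_cons]
      rcases hr c (by simp) with h | ⟨h1, h2⟩
      · rw [if_pos h, ih _ (fun x hx => hr x (by simp [hx]))]
        simp only [pvFlat, List.flatMap_cons, if_pos h]
        refine Prod.ext ?_ (by simp)
        simp only [List.length_append, List.length_cons, List.length_nil]
        push_cast
        ring
      · rw [if_neg (by omega), ih _ (fun x hx => hr x (by simp [hx])),
            hlen c h1 h2]
        simp only [pvFlat, List.flatMap_cons, if_neg (by omega : ¬ c < Ndata)]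
        refine Prod.ext ?_ (by simp)
        simp only [List.length_append]
        push_cast
        ring
  have := key row (0, []) hrow
  simpa [pvAInner] using this

lemma pvMembers_child (children : List (List Int)) (Ndata : Int) (fc : List String) (m : PySem.Dict Int (List String)) (fuel : Nat) (k : Nat)
    (hkeys : ∀ c : Int, (m.get? c).isSome ↔ (Ndata ≤ c ∧ c < Ndata + (k : Int)))
    (c : Int) (hc : c < Ndata ∨ (Ndata ≤ c ∧ c < Ndata + (k : Int))) :
    pvMembers children Ndata fc m (fuel + 1) c =
      (if c < Ndata then [PySem.List.pyGetD fc c ""] else m.getD c []) := by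
  rcases hc with h | ⟨h1, h2⟩
  · have hnone : m.get? c = none := by
      cases hm : m.get? c with
      | none => rfl
      | some v =>
        have : Ndata ≤ c ∧ c < Ndata + (k : Int) := (hkeys c).mp (by simp [hm])
        omega
    simp [pvMembers, hnone, h]
  · have hsome : (m.get? c).isSome := (hkeys c).mpr ⟨h1, h2⟩
    obtain ⟨v, hv⟩ := Option.isSome_iff_exists.mp hsome
    rw [PySem.Dict.getD_of_get?_eq_some m [] hv]
    simp only [pvMembers, hv]
    exact (if_neg (by omega : ¬ c < Ndata)).symm

lemma pvMembers_top (children : List (List Int)) (Ndata : Int) (fc : List String) (m : PySem.Dict Int (List String)) (fuel : Nat) (i : Nat)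
    (row : List Int) (rest : List (List Int)) (hdrop : children.drop i = row :: rest)
    (hkeys : ∀ c : Int, (m.get? c).isSome ↔ (Ndata ≤ c ∧ c < Ndata + (i : Int)))
    (hrow : ∀ c ∈ row, c < Ndata ∨ (Ndata ≤ c ∧ c < Ndata + (i : Int))) :
    pvMembers children Ndata fc m (fuel + 2) ((i : Int) + Ndata) = pvFlat Ndata fc m row := by
  have hlt : i < children.length := by
    have := congrArg List.length hdrop
    simp at this
    omega
  have hnone : m.get? ((i : Int) + Ndata) = none := by
    cases hm : m.get? ((i : Int) + Ndata) with
    | none => rfl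
    | some v =>
      have : Ndata ≤ (i : Int) + Ndata ∧ (i : Int) + Ndata < Ndata + (i : Int) :=
        (hkeys _).mp (by simp [hm])
      omega
  have hidx : (i : Int) + Ndata - Ndata = ((i : Nat) : Int) := by ring
  have hget : PySem.List.pyGetD children ((i : Int) + Ndata - Ndata) [] = row := by
    rw [hidx, PySem.List.pyGetD_natCast]
    have h2 := List.getElem_cons_drop (as := children) (i := i) hlt
    rw [hdrop] at h2
    have hrw : children[i] = row := (List.cons.injEq _ _ _ _).mp h2 |>.1
    simp [List.getD, hrw, List.getElem?_eq_getElem hlt]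
  have hfold : ∀ (r : List Int) (acc : List String),
      (∀ c ∈ r, c < Ndata ∨ (Ndata ≤ c ∧ c < Ndata + (i : Int))) →
      r.foldl (fun out c => out ++ pvMembers children Ndata fc m (fuel + 1) c) acc
        = acc ++ pvFlat Ndata fc m r := by
    intro r
    induction r with
    | nil => intro acc _; simp [pvFlat]
    | cons c cs ih =>
      intro acc hr
      simp only [List.foldl_cons]
      rw [pvMembers_child children Ndata fc m fuel i hkeys c (hr c (by simp)),
          ih _ (fun x hx => hr x (by simp [hx]))]
      simp [pvFlat]
  have hne : ¬ ((i : Int) + Ndata < Ndata) := by omega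
  show pvMembers children Ndata fc m ((fuel + 1) + 1) ((i : Int) + Ndata) = _
  simp only [pvMembers, hnone, hne, if_false, hget]
  exact hfold row [] hrow

lemma pvLoop_eq (children : List (List Int)) (Ndata : Int) (fc : List String) :
    ∀ (rest : List (List Int)) (i : Nat) (nl : List Int) (d : PySem.Dict Int (List String)),
    children.drop i = rest →
    pvPreFrom Ndata (fc.length : Int) i rest = true →
    (∀ c : Int, (d.get? c).isSome ↔ (Ndata ≤ c ∧ c < Ndata + (i : Int))) →
    nl = (List.range i).map (fun (j : Nat) => (((d.getD ((j : Int) + Ndata) []).length : Int))) →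
    pvALoop Ndata fc rest i (nl, d) =
      ((List.range (i + rest.length)).map
        (fun (j : Nat) => (((pvBLoop children Ndata fc rest i d).getD ((j : Int) + Ndata) []).length : Int)),
       pvBLoop children Ndata fc rest i d) := by
  intro rest
  induction rest with
  | nil =>
    intro i nl d _ _ _ hnl
    simp [pvALoop, pvBLoop, hnl]
  | cons row rest ih =>
    intro i nl d hdrop hpre hkeys hnl
    have hlt : i < children.length := by
      have := congrArg List.length hdrop
      simp at this
      omega
    have hdrop' : children.drop (i + 1) = rest := by
      have h2 := List.getElem_cons_drop (as := children) (i := i) hlt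
      rw [hdrop] at h2
      exact ((List.cons.injEq _ _ _ _).mp h2).2
    have hnllen : nl.length = i := by simp [hnl]
    -- unpack the precondition
    have hpre1 : pvRowOK Ndata (fc.length : Int) (i : Int) row = true := by
      simp only [pvPreFrom, Bool.and_eq_true] at hpre
      exact hpre.1
    have hpre2 : pvPreFrom Ndata (fc.length : Int) (i + 1) rest = true := by
      simp only [pvPreFrom, Bool.and_eq_true] at hpre
      exact hpre.2
    have hrow : ∀ c ∈ row, c < Ndata ∨ (Ndata ≤ c ∧ c < Ndata + (i : Int)) := by
      intro c hc
      have hb := (List.all_eq_true.mp hpre1) c hc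
      simp only [Bool.or_eq_true, Bool.and_eq_true, decide_eq_true_eq] at hb
      rcases hb with ⟨⟨h, _⟩, _⟩ | ⟨h1, h2⟩
      · exact Or.inl h
      · exact Or.inr ⟨h1, h2⟩
    -- lookups into nl agree with lengths in d
    have hlen : ∀ c : Int, Ndata ≤ c → c < Ndata + (nl.length : Int) →
        PySem.List.pyGetD nl (c - Ndata) 0 = ((d.getD c []).length : Int) := by
      intro c h1 h2
      rw [hnllen] at h2
      have hj : c - Ndata = (((c - Ndata).toNat : Nat) : Int) := by omega
      have hjlt : (c - Ndata).toNat < i := by omega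
      rw [hj, PySem.List.pyGetD_natCast, hnl]
      rw [List.getD_eq_getElem _ _ (by simpa using hjlt)]
      simp only [List.getElem_map, List.getElem_range]
      have hc : (((c - Ndata).toNat : Nat) : Int) + Ndata = c := by omega
      rw [hc]
    -- the common new member list
    set flat := pvFlat Ndata fc d row with hflat
    have hrow' : ∀ c ∈ row, c < Ndata ∨ (Ndata ≤ c ∧ c < Ndata + (nl.length : Int)) := by
      rw [hnllen]; exact hrow
    have hinner : pvAInner Ndata fc nl d row = (((flat.length) : Int), flat) :=
      pvAInner_eq Ndata fc nl d row hlen hrow'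
    have hfuel : children.length + 1 = (children.length - 1) + 2 := by omega
    have hmem : pvMembers children Ndata fc d (children.length + 1) ((i : Int) + Ndata) = flat := by
      rw [hfuel]
      exact pvMembers_top children Ndata fc d _ i row rest hdrop hkeys hrow
    set d' := d.insert ((i : Int) + Ndata) flat with hd'
    -- invariants for i + 1
    have hkeys' : ∀ c : Int, (d'.get? c).isSome ↔ (Ndata ≤ c ∧ c < Ndata + ((i + 1 : Nat) : Int)) := by
      intro c
      rw [hd', PySem.Dict.get?_insert]
      by_cases hceq : c = (i : Int) + Ndata
      · simp [hceq]; omega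
      · rw [if_neg hceq]
        rw [hkeys c]
        push_cast
        omega
    have hnl' : nl ++ [((flat.length : Nat) : Int)] =
        (List.range (i + 1)).map (fun (j : Nat) => (((d'.getD ((j : Int) + Ndata) []).length : Int))) := by
      rw [List.range_succ, List.map_append, hnl]
      congr 1
      · apply List.map_congr_left
        intro j hj
        have hjlt : j < i := List.mem_range.mp hj
        rw [hd', PySem.Dict.getD_insert, if_neg (by omega : ¬ ((j : Int) + Ndata = (i : Int) + Ndata))]
      · simp [hd', PySem.Dict.getD_insert]
    -- take one step on both sides
    show pvALoop Ndata fc (row :: rest) i (nl, d) = _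
    simp only [pvALoop, pvBLoop, hinner, hmem]
    rw [← hd']
    rw [ih (i + 1) (nl ++ [(flat.length : Int)]) d' hdrop' hpre2 hkeys' hnl']
    have hcount : i + (row :: rest).length = (i + 1) + rest.length := by simp; omega
    rw [hcount]

-- ===== VERDICT (by name: the statement is the Claim_ definition above) =====
theorem calc_node_assignments_spec : Claim_equal_calc_node_assignments := by
  intro children Ndata fc _ hpre
  unfold Spec_calc_node_assignments calc_node_assignments calc_node_assignments_alt
  have h0 : ∀ c : Int, ((PySem.Dict.empty : PySem.Dict Int (List String)).get? c).isSome ↔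
      (Ndata ≤ c ∧ c < Ndata + ((0 : Nat) : Int)) := by
    intro c
    constructor
    · intro h
      simp [PySem.Dict.get?_empty] at h
    · intro h
      exact absurd h (by omega)
  have := pvLoop_eq children Ndata fc children 0 [] PySem.Dict.empty rfl hpre h0 (by simp)
  rw [this]
  simp
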